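-- pv_equiv track=rewrite | github.com/Lobberwolf/advent-of-code-2022 | day-01/main.py | get_grouped_inventories
-- ===== SOURCE A (Python) =====
-- def get_grouped_inventories(inputs:list, separator:str) -> list:
--     grouped_inventories = []
--     inventory = []
--     for input in inputs:
--         if input != separator:
--             inventory.append(int(input))
--         else:
--             grouped_inventories.append(inventory)
--             inventory = []
--     return grouped_inventories
-- ===== SOURCE B (Python) =====
-- def get_grouped_inventories(inputs: list, separator: str) -> list:
--     nums = [int(x) for x in inputs if x != separator]
--     sep_positions = [i for i, x in enumerate(inputs) if x == separator]
--     result = []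
--     start = 0
--     for k, p in enumerate(sep_positions):
--         end = p - k  # count of non-separator elements before position p
--         result.append(nums[start:end])
--         start = end
--     return result
-- ===== Notes on version B (the rewrite author's own statement) =====
-- stated objective: alternative
-- what changed: Instead of one element-by-element pass carrying a current-inventory accumulator, B parses all numbers once into a flat list, collects the separator positions, and cuts the number list by index arithmetic (group k ends at position_k - k).
import Mathlib
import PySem

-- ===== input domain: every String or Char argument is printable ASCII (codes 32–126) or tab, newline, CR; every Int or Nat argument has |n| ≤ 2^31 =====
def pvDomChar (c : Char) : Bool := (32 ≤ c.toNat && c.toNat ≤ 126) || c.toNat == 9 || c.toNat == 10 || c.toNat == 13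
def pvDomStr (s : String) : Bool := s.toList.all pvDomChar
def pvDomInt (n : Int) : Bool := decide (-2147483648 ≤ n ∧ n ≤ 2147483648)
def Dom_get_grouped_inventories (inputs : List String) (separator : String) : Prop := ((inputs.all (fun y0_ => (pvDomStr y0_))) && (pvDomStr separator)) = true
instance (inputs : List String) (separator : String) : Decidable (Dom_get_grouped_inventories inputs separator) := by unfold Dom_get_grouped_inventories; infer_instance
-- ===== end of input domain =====

-- B replaces A's accumulator pass: parse all numbers once, collect separator positions, and cut the number list by index arithmetic; alternative decomposition, same cost.


-- ===== PORT A =====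
-- literal port of A: one fold over the inputs with (grouped_inventories, inventory) state;
-- int(input) is PySem.Int.ofStr?; Pre_ guarantees it succeeds (Python raises ValueError otherwise)
def get_grouped_inventories (inputs : List String) (separator : String) : List (List Int) :=
  (inputs.foldl
    (fun (st : List (List Int) × List Int) input =>
      if input ≠ separator then (st.1, st.2 ++ [(PySem.Int.ofStr? input).getD 0])
      else (st.1 ++ [st.2], ([] : List Int)))
    ([], [])).1

-- ===== PORT B =====
-- literal port of B: parse all numbers once (left to right, skipping separators),
-- collect separator positions via enumerate+filter, then cut the number list:
-- group k is nums[start : p_k - k] with start the previous cut point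
def get_grouped_inventories_alt (inputs : List String) (separator : String) : List (List Int) :=
  let nums : List Int :=
    (inputs.filter (fun x => !(x == separator))).map (fun x => (PySem.Int.ofStr? x).getD 0)
  let sep_positions : List Int :=
    ((PySem.List.enumerate inputs).filter (fun p => p.2 == separator)).map (fun p => p.1)
  ((PySem.List.enumerate sep_positions).foldl
    (fun (st : List (List Int) × Int) kp =>
      (st.1 ++ [PySem.List.slice nums (some st.2) (some (kp.2 - kp.1))], kp.2 - kp.1))
    ([], 0)).1

-- ===== PRECONDITION & SPEC =====
-- Pre_ excludes exactly the inputs on which Python A raises ValueError: some element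
-- other than the separator that int() cannot parse (A calls int on every non-separator element).
def Pre_get_grouped_inventories (inputs : List String) (separator : String) : Prop :=
  ∀ s ∈ inputs, s ≠ separator → (PySem.Int.ofStr? s).isSome = true
instance (inputs : List String) (separator : String) : Decidable (Pre_get_grouped_inventories inputs separator) := by
  unfold Pre_get_grouped_inventories; infer_instance
def pvWitness_get_grouped_inventories : List String × String := (["1", " 2 ", "", "+3", "4", "", "5"], "")

def Spec_get_grouped_inventories (inputs : List String) (separator : String) (out : List (List Int)) : Prop := out = get_grouped_inventories_alt inputs separator
instance (inputs : List String) (separator : String) (out : List (List Int)) : Decidable (Spec_get_grouped_inventories inputs separator out) := by unfold Spec_get_grouped_inventories; infer_instance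

-- ===== CLAIM (what is proved, stated in full; the proofs are below) =====
def Claim_equal_get_grouped_inventories : Prop := ∀ (inputs : List String) (separator : String), Dom_get_grouped_inventories inputs separator → Pre_get_grouped_inventories inputs separator → Spec_get_grouped_inventories inputs separator (get_grouped_inventories inputs separator)
-- ===== LEMMAS AND PROOFS =====

-- the parsed value of one element
def pvParse (s : String) : Int := (PySem.Int.ofStr? s).getD 0

-- reference recursion both ports are shown to satisfy
def pvSpec (sep : String) : List String → List (List Int)
  | [] => []
  | x :: xs =>
      if x = sep then [] :: pvSpec sep xs
      else match pvSpec sep xs with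
           | [] => []
           | g :: gs => (pvParse x :: g) :: gs

-- ---- A side ----
theorem pvA_loop (sep : String) (inputs : List String) :
    ∀ (g : List (List Int)) (inv : List Int),
      (inputs.foldl
        (fun (st : List (List Int) × List Int) input =>
          if input ≠ sep then (st.1, st.2 ++ [(PySem.Int.ofStr? input).getD 0])
          else (st.1 ++ [st.2], ([] : List Int)))
        (g, inv)).1
      = g ++ (match pvSpec sep inputs with
              | [] => []
              | h :: t => (inv ++ h) :: t) := by
  induction inputs with
  | nil => intro g inv; simp [pvSpec]
  | cons x xs ih =>
    intro g inv
    simp only [List.foldl_cons]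
    by_cases hx : x = sep
    · rw [if_neg (fun h => h hx), ih]
      simp only [pvSpec, if_pos hx]
      cases pvSpec sep xs <;> simp
    · rw [if_pos hx, ih]
      simp only [pvSpec, if_neg hx]
      cases pvSpec sep xs <;> simp [pvParse]

-- ---- B side ----
-- the fold of B, abstracted over the accumulator and start; pairs are (k, p) from enumerate
def pvSegs (nums : List Int) (pairs : List (Int × Int)) (acc : List (List Int)) (start : Int) : List (List Int) :=
  (pairs.foldl
    (fun (st : List (List Int) × Int) kp =>
      (st.1 ++ [PySem.List.slice nums (some st.2) (some (kp.2 - kp.1))], kp.2 - kp.1))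
    (acc, start)).1

theorem pvSegs_nil (nums : List Int) (acc : List (List Int)) (start : Int) :
    pvSegs nums [] acc start = acc := rfl

theorem pvSegs_cons (nums : List Int) (q : Int × Int) (pairs : List (Int × Int))
    (acc : List (List Int)) (start : Int) :
    pvSegs nums (q :: pairs) acc start
      = pvSegs nums pairs
          (acc ++ [PySem.List.slice nums (some start) (some (q.2 - q.1))]) (q.2 - q.1) := rfl

theorem pvSegs_acc (nums : List Int) (pairs : List (Int × Int)) :
    ∀ acc start, pvSegs nums pairs acc start = acc ++ pvSegs nums pairs [] start := by
  induction pairs with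
  | nil => intro acc start; simp [pvSegs_nil]
  | cons q rest ih =>
    intro acc start
    rw [pvSegs_cons, pvSegs_cons, ih, ih (([] : List (List Int)) ++ _)]
    simp

-- shifting both components of every pair leaves the cut points p - k unchanged
theorem pvSegs_shift_both (nums : List Int) (pairs : List (Int × Int)) :
    ∀ acc start,
      pvSegs nums (pairs.map (fun q => (q.1 + 1, q.2 + 1))) acc start
        = pvSegs nums pairs acc start := by
  induction pairs with
  | nil => intro acc start; rfl
  | cons q rest ih =>
    intro acc start
    rw [List.map_cons, pvSegs_cons, pvSegs_cons]
    have h : q.2 + 1 - (q.1 + 1) = q.2 - q.1 := by ring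
    simp only [h]
    exact ih _ _

theorem pvSlice_cons_succ {α : Type} (x : α) (xs : List α) (a b : Int) (ha : 0 ≤ a) (hb : 0 ≤ b) :
    PySem.List.slice (x :: xs) (some (a + 1)) (some (b + 1)) = PySem.List.slice xs (some a) (some b) := by
  rw [PySem.List.slice_toNat (x :: xs) (by omega) (by omega), PySem.List.slice_toNat xs ha hb]
  have h1 : (a + 1).toNat = a.toNat + 1 := by omega
  have h2 : (b + 1).toNat = b.toNat + 1 := by omega
  rw [h1, h2]
  simp

-- shifting only the positions (a new non-separator element in front) shifts every cut by one
theorem pvSegs_shift_snd (v : Int) (nums : List Int) (pairs : List (Int × Int))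
    (hpos : ∀ q ∈ pairs, 0 ≤ q.2 - q.1) :
    ∀ (a : Int), 0 ≤ a → ∀ acc,
      pvSegs (v :: nums) (pairs.map (fun q => (q.1, q.2 + 1))) acc (a + 1)
        = pvSegs nums pairs acc a := by
  induction pairs with
  | nil => intro a _ acc; rfl
  | cons q rest ih =>
    intro a ha acc
    have hq : 0 ≤ q.2 - q.1 := hpos q (by simp)
    have hrest : ∀ r ∈ rest, 0 ≤ r.2 - r.1 := fun r hr => hpos r (by simp [hr])
    rw [List.map_cons, pvSegs_cons, pvSegs_cons]
    have h : (q.2 + 1) - q.1 = (q.2 - q.1) + 1 := by ring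
    simp only [h]
    rw [pvSlice_cons_succ v nums a (q.2 - q.1) ha hq]
    exact ih hrest (q.2 - q.1) (by omega) _

-- separator-position lists
def pvIdx (sep : String) (xs : List String) : List Int :=
  ((PySem.List.enumerate xs).filter (fun p => p.2 == sep)).map (fun p => p.1)

-- the parsed non-separator elements
def pvNums (sep : String) (xs : List String) : List Int :=
  (xs.filter (fun x => !(x == sep))).map (fun x => (PySem.Int.ofStr? x).getD 0)

theorem pvNums_cons (sep x : String) (xs : List String) :
    pvNums sep (x :: xs)
      = (if x = sep then [] else [(PySem.Int.ofStr? x).getD 0]) ++ pvNums sep xs := by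
  by_cases hx : x = sep <;> simp [pvNums, hx]

theorem pvEnumerate_shift {α : Type} (xs : List α) :
    ∀ s : Int, PySem.List.enumerate xs (s + 1)
      = (PySem.List.enumerate xs s).map (fun p => (p.1 + 1, p.2)) := by
  induction xs with
  | nil => intro s; simp [PySem.List.enumerate_nil]
  | cons x t ih =>
    intro s
    rw [PySem.List.enumerate_cons, PySem.List.enumerate_cons]
    simp only [List.map_cons]
    rw [ih (s + 1)]

theorem pvEnumerate_map {α β : Type} (f : α → β) (xs : List α) :
    ∀ s : Int, PySem.List.enumerate (xs.map f) s
      = (PySem.List.enumerate xs s).map (fun p => (p.1, f p.2)) := by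
  induction xs with
  | nil => intro s; simp [PySem.List.enumerate_nil]
  | cons x t ih =>
    intro s
    rw [List.map_cons, PySem.List.enumerate_cons, PySem.List.enumerate_cons]
    simp only [List.map_cons]
    rw [ih (s + 1)]

theorem pvIdx_cons (sep : String) (x : String) (xs : List String) :
    pvIdx sep (x :: xs)
      = (if x = sep then [(0 : Int)] else []) ++ (pvIdx sep xs).map (· + 1) := by
  simp only [pvIdx, PySem.List.enumerate_cons]
  rw [show (0 : Int) + 1 = 0 + 1 from rfl, pvEnumerate_shift xs 0]
  by_cases hx : x = sep <;>
    simp [hx, List.filter_map, List.map_map, Function.comp_def]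

theorem pvIdx_pos (sep : String) (xs : List String) : ∀ i ∈ pvIdx sep xs, 0 ≤ i := by
  intro i hi
  simp only [pvIdx, List.mem_map, List.mem_filter] at hi
  obtain ⟨p, ⟨hp, _⟩, rfl⟩ := hi
  rw [PySem.List.mem_enumerate_iff] at hp
  obtain ⟨k, hk, rfl⟩ := hp
  simp

theorem pvIdx_sorted (sep : String) (xs : List String) :
    (pvIdx sep xs).Pairwise (· < ·) := by
  rw [pvIdx, List.pairwise_map]
  exact (PySem.List.pairwise_lt_enumerate xs 0).filter _

-- in enumerate of a strictly increasing list bounded below by the start, p - k stays nonnegative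
theorem pvEnum_le (P : List Int) :
    ∀ a : Int, P.Pairwise (· < ·) → (∀ i ∈ P, a ≤ i) →
      ∀ q ∈ PySem.List.enumerate P a, 0 ≤ q.2 - q.1 := by
  induction P with
  | nil => intro a _ _ q hq; simp [PySem.List.enumerate_nil] at hq
  | cons b rest ih =>
    intro a hpw hlb q hq
    rw [PySem.List.enumerate_cons] at hq
    rcases List.mem_cons.mp hq with h | h
    · subst h; have := hlb b (by simp); simp; omega
    · refine ih (a + 1) hpw.of_cons ?_ q h
      intro i hi
      have h1 := List.rel_of_pairwise_cons hpw hi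
      have h2 := hlb b (by simp)
      omega

-- arithmetic helpers for the cut points
theorem pvSub0 (b : Int) : b - 0 = b := by ring

theorem pvSlice00 (nums : List Int) :
    PySem.List.slice nums (some (0 : Int)) (some (0 : Int)) = [] := by
  rw [PySem.List.slice_toNat nums le_rfl le_rfl]; simp

-- B's value satisfies the reference recursion
theorem pvB_eq_spec (sep : String) (inputs : List String) :
    pvSegs (pvNums sep inputs) (PySem.List.enumerate (pvIdx sep inputs) 0) [] 0
      = pvSpec sep inputs := by
  induction inputs with
  | nil => simp [pvIdx, pvSegs_nil, pvSpec, PySem.List.enumerate_nil]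
  | cons x xs ih =>
    rw [pvIdx_cons, pvNums_cons, pvSpec]
    have hpos := pvIdx_pos sep xs
    have hsorted := pvIdx_sorted sep xs
    by_cases hx : x = sep
    · rw [if_pos hx, if_pos hx, if_pos hx, List.singleton_append, List.nil_append,
          PySem.List.enumerate_cons, pvSegs_cons]
      simp only [pvSub0]
      rw [pvSlice00, pvEnumerate_shift, pvEnumerate_map, List.map_map]
      rw [show ((fun p : Int × Int => (p.1 + 1, p.2)) ∘ fun p : Int × Int => (p.1, p.2 + 1))
            = (fun q : Int × Int => (q.1 + 1, q.2 + 1)) from funext fun q => rfl]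
      rw [pvSegs_shift_both, pvSegs_acc, ih]
      simp
    · rw [if_neg hx, if_neg hx, if_neg hx, List.nil_append, List.singleton_append,
          pvEnumerate_map]
      cases hP : pvIdx sep xs with
      | nil =>
        rw [hP] at ih
        rw [PySem.List.enumerate_nil] at ih ⊢
        rw [pvSegs_nil] at ih
        rw [List.map_nil, pvSegs_nil, ← ih]
      | cons b r =>
        rw [hP] at ih hpos hsorted
        rw [PySem.List.enumerate_cons] at ih ⊢
        have hb : 0 ≤ b := hpos b (by simp)
        have hrpos : ∀ p ∈ PySem.List.enumerate r (0 + 1), 0 ≤ p.2 - p.1 := by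
          refine pvEnum_le r (0 + 1) hsorted.of_cons ?_
          intro i hi
          have h1 := List.rel_of_pairwise_cons hsorted hi
          omega
        have hXS : pvSpec sep xs
            = PySem.List.slice (pvNums sep xs) (some (0 : Int)) (some b)
              :: pvSegs (pvNums sep xs) (PySem.List.enumerate r (0 + 1)) [] b := by
          rw [← ih, pvSegs_cons]
          simp only [pvSub0]
          rw [pvSegs_acc]
          simp
        rw [hXS, List.map_cons, pvSegs_cons]
        simp only [pvSub0]
        have hsl : PySem.List.slice ((PySem.Int.ofStr? x).getD 0 :: pvNums sep xs)
              (some (0 : Int)) (some (b + 1))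
            = (PySem.Int.ofStr? x).getD 0
              :: PySem.List.slice (pvNums sep xs) (some (0 : Int)) (some b) := by
          rw [PySem.List.slice_toNat _ (by omega) (by omega),
              PySem.List.slice_toNat _ le_rfl hb]
          have h1 : (b + 1).toNat = b.toNat + 1 := by omega
          simp [h1]
        rw [hsl, pvSegs_shift_snd _ _ _ hrpos b hb, pvSegs_acc]
        simp [pvParse]

theorem pvAlt_eq (inputs : List String) (sep : String) :
    get_grouped_inventories_alt inputs sep
      = pvSegs (pvNums sep inputs) (PySem.List.enumerate (pvIdx sep inputs) 0) [] 0 := rfl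

-- ===== VERDICT (by name: the statement is the Claim_ definition above) =====
theorem get_grouped_inventories_spec : Claim_equal_get_grouped_inventories := by
  intro inputs sep _ _
  show get_grouped_inventories inputs sep = get_grouped_inventories_alt inputs sep
  rw [pvAlt_eq, pvB_eq_spec]
  unfold get_grouped_inventories
  rw [pvA_loop sep inputs [] []]
  cases h : pvSpec sep inputs <;> simp
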